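-- pv_equiv track=rewrite | github.com/niksavis/resource-management | app/services/validation_service.py | suggest_relationship_fixes
-- ===== SOURCE A (Python) =====
-- from typing import Dict, Any, List, Tuple
--
-- def suggest_relationship_fixes(
--     validation_errors: Dict[str, List[str]],
-- ) -> Dict[str, List[str]]:
--     """
--     Suggest fixes for relationship validation errors.
--
--     Args:
--         validation_errors: Dictionary of validation errors by resource type
--
--     Returns:
--         Dictionary of suggested fixes by resource type
--     """
--     fixes = {
--         "people": [],
--         "teams": [],
--         "departments": [],
--         "projects": [],
--     }
--
--     # Generate suggested fixes for each type of error
--     for resource_type, errors in validation_errors.items():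
--         for error in errors:
--             if "belongs to multiple teams" in error:
--                 fixes["people"].append(f"Choose only one team for this person. {error}")
--             elif "department must match team's department" in error:
--                 fixes["people"].append(
--                     f"Update the person's department to match their team's department. {error}"
--                 )
--             elif "is already assigned directly but also belongs to team" in error:
--                 fixes["projects"].append(
--                     f"Choose either direct assignment or team assignment, not both. {error}"
--                 )
--             elif "is assigned but its teams" in error:
--                 fixes["projects"].append(
--                     f"Choose either department assignment or individual team assignments, not both. {error}"
--                 )
--             elif "is assigned but person" in error:
--                 fixes["projects"].append(
--                     f"Choose either department assignment or individual person assignments, not both. {error}"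
--                 )
--
--     return fixes
-- ===== SOURCE B (Python) =====
-- from typing import Dict, List
--
-- _RULES = [
--     ("belongs to multiple teams", "people",
--      "Choose only one team for this person."),
--     ("department must match team's department", "people",
--      "Update the person's department to match their team's department."),
--     ("is already assigned directly but also belongs to team", "projects",
--      "Choose either direct assignment or team assignment, not both."),
--     ("is assigned but its teams", "projects",
--      "Choose either department assignment or individual team assignments, not both."),
--     ("is assigned but person", "projects",
--      "Choose either department assignment or individual person assignments, not both."),
-- ]
--
--
-- def _classify(error: str):
--     for sub, target, prefix in _RULES:
--         if sub in error:
--             return (target, f"{prefix} {error}")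
--     return None
--
--
-- def suggest_relationship_fixes(
--     validation_errors: Dict[str, List[str]],
-- ) -> Dict[str, List[str]]:
--     all_errors = [e for errors in validation_errors.values() for e in errors]
--     tagged = [t for t in map(_classify, all_errors) if t is not None]
--     return {
--         "people": [msg for target, msg in tagged if target == "people"],
--         "teams": [],
--         "departments": [],
--         "projects": [msg for target, msg in tagged if target == "projects"],
--     }
-- ===== Notes on version B (the rewrite author's own statement) =====
-- stated objective: idiomatic
-- what changed: Replaces the mutated four-key dict and the five-branch if/elif chain with a data-driven rules table: each error is classified once (first matching rule) into a (target, message) tag over the flattened error stream, and the result dict is built immutably from two filtered comprehensions.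
import Mathlib
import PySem

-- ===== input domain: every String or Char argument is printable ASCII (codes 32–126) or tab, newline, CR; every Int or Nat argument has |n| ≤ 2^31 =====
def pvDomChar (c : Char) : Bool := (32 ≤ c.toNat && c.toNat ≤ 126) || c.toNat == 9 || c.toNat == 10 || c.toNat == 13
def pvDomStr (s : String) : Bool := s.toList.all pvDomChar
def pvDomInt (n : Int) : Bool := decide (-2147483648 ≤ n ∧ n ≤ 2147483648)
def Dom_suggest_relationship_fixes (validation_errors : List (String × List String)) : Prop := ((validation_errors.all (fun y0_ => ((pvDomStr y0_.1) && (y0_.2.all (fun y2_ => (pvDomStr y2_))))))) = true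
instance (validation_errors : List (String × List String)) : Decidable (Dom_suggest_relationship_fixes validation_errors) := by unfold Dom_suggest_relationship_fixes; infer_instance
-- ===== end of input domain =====

-- B replaces A's mutated four-key dict and if/elif chain by a rules table, per-error
-- classification over the flattened error stream, and an immutably built result (idiomatic).

-- ===== PORT A =====
-- one error processed against the if/elif chain, mutating the fixes dict
def pvStepA (fixes : PySem.Dict String (List String)) (error : String) : PySem.Dict String (List String) :=
  if PySem.Str.isIn "belongs to multiple teams" error then
    fixes.modify "people" [] (· ++ ["Choose only one team for this person. " ++ error])
  else if PySem.Str.isIn "department must match team's department" error then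
    fixes.modify "people" [] (· ++ ["Update the person's department to match their team's department. " ++ error])
  else if PySem.Str.isIn "is already assigned directly but also belongs to team" error then
    fixes.modify "projects" [] (· ++ ["Choose either direct assignment or team assignment, not both. " ++ error])
  else if PySem.Str.isIn "is assigned but its teams" error then
    fixes.modify "projects" [] (· ++ ["Choose either department assignment or individual team assignments, not both. " ++ error])
  else if PySem.Str.isIn "is assigned but person" error then
    fixes.modify "projects" [] (· ++ ["Choose either department assignment or individual person assignments, not both. " ++ error])
  else fixes

def suggest_relationship_fixes (validation_errors : List (String × List String)) : List (String × List String) :=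
  let fixes : PySem.Dict String (List String) :=
    PySem.Dict.ofList [("people", []), ("teams", []), ("departments", []), ("projects", [])]
  (validation_errors.foldl (fun fixes rte => rte.2.foldl pvStepA fixes) fixes).items

-- ===== PORT B =====
def pvRules : List (String × String × String) :=
  [("belongs to multiple teams", "people",
    "Choose only one team for this person."),
   ("department must match team's department", "people",
    "Update the person's department to match their team's department."),
   ("is already assigned directly but also belongs to team", "projects",
    "Choose either direct assignment or team assignment, not both."),
   ("is assigned but its teams", "projects",
    "Choose either department assignment or individual team assignments, not both."),
   ("is assigned but person", "projects",
    "Choose either department assignment or individual person assignments, not both.")]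

def pvClassify (error : String) : Option (String × String) :=
  (pvRules.find? (fun r => PySem.Str.isIn r.1 error)).map
    (fun r => (r.2.1, r.2.2 ++ " " ++ error))

def suggest_relationship_fixes_alt (validation_errors : List (String × List String)) : List (String × List String) :=
  let allErrors := validation_errors.flatMap (·.2)
  let tagged := (allErrors.map pvClassify).filterMap id
  [("people", (tagged.filter (·.1 == "people")).map (·.2)),
   ("teams", []),
   ("departments", []),
   ("projects", (tagged.filter (·.1 == "projects")).map (·.2))]

-- ===== PRECONDITION & SPEC =====
def Spec_suggest_relationship_fixes (validation_errors : List (String × List String)) (out : List (String × List String)) : Prop := out = suggest_relationship_fixes_alt validation_errors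
instance (validation_errors : List (String × List String)) (out : List (String × List String)) : Decidable (Spec_suggest_relationship_fixes validation_errors out) := by unfold Spec_suggest_relationship_fixes; infer_instance

-- ===== CLAIM (what is proved, stated in full; the proofs are below) =====
def Claim_equal_suggest_relationship_fixes : Prop := ∀ (validation_errors : List (String × List String)), Dom_suggest_relationship_fixes validation_errors → Spec_suggest_relationship_fixes validation_errors (suggest_relationship_fixes validation_errors)

-- ===== LEMMAS AND PROOFS =====

-- the shape every intermediate fixes dict has: only "people" and "projects" evolve
def pvMkD (p q : List String) : PySem.Dict String (List String) :=
  PySem.Dict.mk [("people", p), ("teams", []), ("departments", []), ("projects", q)]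

def pvPeople (l : List String) : List String :=
  (((l.map pvClassify).filterMap id).filter (·.1 == "people")).map (·.2)

def pvProjects (l : List String) : List String :=
  (((l.map pvClassify).filterMap id).filter (·.1 == "projects")).map (·.2)

theorem pvStepA_mkD (p q : List String) (e : String) :
    pvStepA (pvMkD p q) e = pvMkD (p ++ pvPeople [e]) (q ++ pvProjects [e]) := by
  unfold pvStepA pvMkD pvPeople pvProjects pvClassify pvRules
  by_cases h1 : PySem.Str.isIn "belongs to multiple teams" e = true
  · simp [PySem.Str.isIn_eq] at h1
    simp [h1, PySem.Dict.modify, PySem.Dict.insert, PySem.Dict.getD, PySem.Dict.get?, PySem.Dict.contains, List.find?]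
  · by_cases h2 : PySem.Str.isIn "department must match team's department" e = true
    · simp [PySem.Str.isIn_eq] at h1 h2
      simp [h1, h2, PySem.Dict.modify, PySem.Dict.insert, PySem.Dict.getD, PySem.Dict.get?, PySem.Dict.contains, List.find?]
    · by_cases h3 : PySem.Str.isIn "is already assigned directly but also belongs to team" e = true
      · simp [PySem.Str.isIn_eq] at h1 h2 h3
        simp [h1, h2, h3, PySem.Dict.modify, PySem.Dict.insert, PySem.Dict.getD, PySem.Dict.get?, PySem.Dict.contains, List.find?]
      · by_cases h4 : PySem.Str.isIn "is assigned but its teams" e = true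
        · simp [PySem.Str.isIn_eq] at h1 h2 h3 h4
          simp [h1, h2, h3, h4, PySem.Dict.modify, PySem.Dict.insert, PySem.Dict.getD, PySem.Dict.get?, PySem.Dict.contains, List.find?]
        · by_cases h5 : PySem.Str.isIn "is assigned but person" e = true
          · simp [PySem.Str.isIn_eq] at h1 h2 h3 h4 h5
            simp [h1, h2, h3, h4, h5, PySem.Dict.modify, PySem.Dict.insert, PySem.Dict.getD, PySem.Dict.get?, PySem.Dict.contains, List.find?]
          · simp [PySem.Str.isIn_eq] at h1 h2 h3 h4 h5
            simp [h1, h2, h3, h4, h5, List.find?]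

theorem pvPeople_append (a b : List String) : pvPeople (a ++ b) = pvPeople a ++ pvPeople b := by
  simp [pvPeople, List.filterMap_append, List.filter_append, List.map_append]

theorem pvProjects_append (a b : List String) : pvProjects (a ++ b) = pvProjects a ++ pvProjects b := by
  simp [pvProjects, List.filterMap_append, List.filter_append, List.map_append]

theorem pvFoldA_mkD (l : List String) (p q : List String) :
    l.foldl pvStepA (pvMkD p q) = pvMkD (p ++ pvPeople l) (q ++ pvProjects l) := by
  induction l generalizing p q with
  | nil => simp [pvPeople, pvProjects]
  | cons e l ih =>
      rw [List.foldl_cons, pvStepA_mkD, ih]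
      have hp : pvPeople (e :: l) = pvPeople [e] ++ pvPeople l := pvPeople_append [e] l
      have hq : pvProjects (e :: l) = pvProjects [e] ++ pvProjects l := pvProjects_append [e] l
      rw [hp, hq, List.append_assoc, List.append_assoc]

theorem pvOuter (ve : List (String × List String)) (p q : List String) :
    ve.foldl (fun fixes rte => rte.2.foldl pvStepA fixes) (pvMkD p q)
      = pvMkD (p ++ pvPeople (ve.flatMap (·.2))) (q ++ pvProjects (ve.flatMap (·.2))) := by
  induction ve generalizing p q with
  | nil => simp [pvPeople, pvProjects]
  | cons rte ve ih =>
      rw [List.foldl_cons, pvFoldA_mkD, ih]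
      simp [pvPeople_append, pvProjects_append]

-- ===== VERDICT (by name: the statement is the Claim_ definition above) =====
theorem suggest_relationship_fixes_spec : Claim_equal_suggest_relationship_fixes := by
  intro ve _
  show (List.foldl (fun fixes rte => List.foldl pvStepA fixes rte.2) (pvMkD [] []) ve).items
      = suggest_relationship_fixes_alt ve
  rw [pvOuter]
  simp [pvMkD, suggest_relationship_fixes_alt, pvPeople, pvProjects]
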